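-- pv_equiv track=rewrite | github.com/MatthiasKohl/convex_schedule | shapes/convex_shapes.py | candidates_without_rotations
-- ===== SOURCE A (Python) =====
-- import copy
-- import itertools
--
-- def candidates_without_rotations(shape_candidates):
--     candidates = copy.deepcopy(shape_candidates)
--     for n in candidates:
--         while (True):
--             has_rotations = False
--             for p1, p2 in itertools.combinations(candidates[n], 2):
--                 if ({s for s in p1} == {s for s in p2}):
--                     has_rotations = True
--                     break
--             if (not has_rotations):
--                 break
--             candidates[n].remove(p1)
--     return candidates
-- ===== SOURCE B (Python) =====
-- def candidates_without_rotations(shape_candidates):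
--     result = {}
--     for n, shapes in shape_candidates.items():
--         seen = set()
--         kept = []
--         for p in reversed(shapes):
--             if frozenset(p) not in seen:
--                 kept.append(p)
--             seen.add(frozenset(p))
--         result[n] = kept[::-1]
--     return result
-- ===== Notes on version B (the rewrite author's own statement) =====
-- stated objective: faster
-- what changed: Replaces A's per-key fixpoint of repeated itertools.combinations scans plus list.remove with a single reverse pass per key keeping a set of frozensets of dimension values (keep the last occurrence of each value-set, preserving order).
import Mathlib
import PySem

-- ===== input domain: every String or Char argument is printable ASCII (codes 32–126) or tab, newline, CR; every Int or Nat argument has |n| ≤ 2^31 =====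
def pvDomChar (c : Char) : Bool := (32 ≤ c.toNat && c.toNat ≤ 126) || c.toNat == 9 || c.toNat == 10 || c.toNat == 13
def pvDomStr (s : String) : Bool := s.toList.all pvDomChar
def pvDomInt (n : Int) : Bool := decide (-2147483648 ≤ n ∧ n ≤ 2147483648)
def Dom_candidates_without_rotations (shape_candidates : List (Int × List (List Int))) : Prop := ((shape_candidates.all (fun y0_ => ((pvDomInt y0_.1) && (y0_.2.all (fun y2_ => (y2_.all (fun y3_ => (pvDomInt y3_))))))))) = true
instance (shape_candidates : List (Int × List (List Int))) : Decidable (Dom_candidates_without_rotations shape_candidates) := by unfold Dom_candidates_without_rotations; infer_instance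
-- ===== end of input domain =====

-- B replaces A's repeated combinations+remove fixpoint per key by one reverse pass with a
-- seen-set of frozensets (keep last occurrence of each dimension-value set); return value only,
-- A returns a deep copy and B fresh lists (value-equal).

-- set(p1) == set(p2) for lists of ints (double inclusion)
def setEq (a b : List Int) : Bool := (a.all (fun s => b.contains s)) && (b.all (fun s => a.contains s))

-- ===== PORT A =====
-- the inner `for p1, p2 in combinations(...)` with break: first p1 having a later set-equal p2
def findFirst : List (List Int) → Option (List Int)
  | [] => none
  | x :: t => if t.any (fun q => setEq x q) then some x else findFirst t

-- A's `while True` loop; each iteration removes one element, so xs.length is enough fuel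
def loopA : Nat → List (List Int) → List (List Int)
  | 0, xs => xs
  | f + 1, xs =>
    match findFirst xs with
    | none => xs
    | some p => loopA f ((PySem.List.remove? xs p).getD xs)

def candidates_without_rotations (shape_candidates : List (Int × List (List Int))) : List (Int × List (List Int)) :=
  shape_candidates.map (fun e => (e.1, loopA e.2.length e.2))

-- ===== PORT B =====
-- the reverse pass: `seen` is the set of frozensets already met (membership = set equality)
def goB (seen : List (List Int)) : List (List Int) → List (List Int)
  | [] => []
  | y :: ys => if seen.any (fun q => setEq q y) then goB (y :: seen) ys else y :: goB (y :: seen) ys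

def candidates_without_rotations_alt (shape_candidates : List (Int × List (List Int))) : List (Int × List (List Int)) :=
  shape_candidates.map (fun e => (e.1, (goB [] e.2.reverse).reverse))

-- ===== PRECONDITION & SPEC =====
def Spec_candidates_without_rotations (shape_candidates : List (Int × List (List Int))) (out : List (Int × List (List Int))) : Prop := out = candidates_without_rotations_alt shape_candidates
instance (shape_candidates : List (Int × List (List Int))) (out : List (Int × List (List Int))) : Decidable (Spec_candidates_without_rotations shape_candidates out) := by unfold Spec_candidates_without_rotations; infer_instance

-- ===== CLAIM (what is proved, stated in full; the proofs are below) =====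
def Claim_equal_candidates_without_rotations : Prop := ∀ (shape_candidates : List (Int × List (List Int))), Dom_candidates_without_rotations shape_candidates → Spec_candidates_without_rotations shape_candidates (candidates_without_rotations shape_candidates)

-- ===== LEMMAS AND PROOFS =====

-- common specification: keep x iff no set-equal element occurs later (nor in `seen`)
def keepLastG (seen : List (List Int)) : List (List Int) → List (List Int)
  | [] => []
  | x :: t => if (t ++ seen).any (fun q => setEq q x) then keepLastG seen t else x :: keepLastG seen t

theorem setEq_comm (a b : List Int) : setEq a b = setEq b a := by
  simp [setEq, Bool.and_comm]

theorem setEq_refl (a : List Int) : setEq a a = true := by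
  simp [setEq]

theorem keepLastG_cons_pos (seen x t) (h : (t ++ seen).any (fun q => setEq q x) = true) :
    keepLastG seen (x :: t) = keepLastG seen t := by
  simp only [keepLastG, h, if_true]

theorem keepLastG_cons_neg (seen x t) (h : (t ++ seen).any (fun q => setEq q x) = false) :
    keepLastG seen (x :: t) = x :: keepLastG seen t := by
  simp only [keepLastG, h, Bool.false_eq_true, if_false]

-- ---- B side ----

theorem goB_append (as : List (List Int)) : ∀ (s bs : List (List Int)),
    goB s (as ++ bs) = goB s as ++ goB (as.reverse ++ s) bs := by
  induction as with
  | nil => intro s bs; simp [goB]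
  | cons a as ih =>
    intro s bs
    by_cases h : s.any (fun q => setEq q a) = true <;>
      simp [goB, h, ih (a :: s) bs]

theorem goB_rev (xs : List (List Int)) : ∀ seen,
    (goB seen xs.reverse).reverse = keepLastG seen xs := by
  induction xs with
  | nil => intro seen; simp [goB, keepLastG]
  | cons x t ih =>
    intro seen
    have key : (goB seen (t.reverse ++ [x])).reverse
        = (if (t ++ seen).any (fun q => setEq q x) then ([] : List (List Int)) else [x])
          ++ (goB seen t.reverse).reverse := by
      rw [goB_append]
      by_cases h : (t ++ seen).any (fun q => setEq q x) = true <;>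
        simp [goB, h]
    cases h : (t ++ seen).any (fun q => setEq q x) with
    | true =>
      rw [List.reverse_cons, key, h, keepLastG_cons_pos seen x t h, ih seen]; rfl
    | false =>
      rw [List.reverse_cons, key, h, keepLastG_cons_neg seen x t h, ih seen]; rfl

-- ---- A side ----

theorem findFirst_mem : ∀ xs p, findFirst xs = some p → p ∈ xs := by
  intro xs
  induction xs with
  | nil => intro p h; simp [findFirst] at h
  | cons x t ih =>
    intro p h
    by_cases hc : t.any (fun q => setEq x q) = true
    · simp [findFirst, hc] at h; simp [h]
    · simp [findFirst, hc] at h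
      exact List.mem_cons_of_mem _ (ih p h)

-- from ¬ t.any (setEq x ·), the flipped-argument condition over t ++ [] is false
theorem cond_false_of_not_any (x : List Int) (t : List (List Int))
    (hc : ¬ (t.any fun q => setEq x q) = true) :
    ((t ++ []).any fun q => setEq q x) = false := by
  rw [List.append_nil]
  apply List.any_eq_false.mpr
  intro a ha
  cases hax : setEq a x with
  | false => simp
  | true =>
    exact absurd (List.any_eq_true.mpr ⟨a, ha, (setEq_comm x a).symm ▸ hax⟩) hc

theorem findFirst_none_keep : ∀ xs, findFirst xs = none → keepLastG [] xs = xs := by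
  intro xs
  induction xs with
  | nil => intro _; rfl
  | cons x t ih =>
    intro h
    by_cases hc : t.any (fun q => setEq x q) = true
    · simp [findFirst, hc] at h
    · simp [findFirst, hc] at h
      rw [keepLastG_cons_neg [] x t (cond_false_of_not_any x t hc), ih h]

theorem remove?_subset {α : Type} [BEq α] [LawfulBEq α] :
    ∀ (xs ys : List α) (v : α), PySem.List.remove? xs v = some ys → ∀ a ∈ ys, a ∈ xs := by
  intro xs ys v h a ha
  have hv : v ∈ xs := by
    by_contra hv
    rw [(PySem.List.remove?_eq_none_iff xs v).mpr hv] at h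
    cases h
  rw [PySem.List.remove?_eq_some_erase xs v hv] at h
  cases h
  exact List.Sublist.subset List.erase_sublist ha

theorem step : ∀ xs p, findFirst xs = some p →
    ∃ ys, PySem.List.remove? xs p = some ys ∧ ys.length + 1 = xs.length ∧
      keepLastG [] ys = keepLastG [] xs := by
  intro xs
  induction xs with
  | nil => intro p h; simp [findFirst] at h
  | cons x t ih =>
    intro p h
    by_cases hc : t.any (fun q => setEq x q) = true
    · simp [findFirst, hc] at h
      subst h
      refine ⟨t, PySem.List.remove?_cons_self .., rfl, ?_⟩
      obtain ⟨a, ha, hax⟩ := List.any_eq_true.mp hc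
      have hc' : ((t ++ []).any fun q => setEq q x) = true := by
        rw [List.append_nil]
        exact List.any_eq_true.mpr ⟨a, ha, (setEq_comm a x).trans hax⟩
      rw [keepLastG_cons_pos [] x t hc']
    · simp [findFirst, hc] at h
      obtain ⟨ys', hrem, hlen, hkeep⟩ := ih p h
      have hpt : p ∈ t := findFirst_mem t p h
      have hne : x ≠ p := by
        intro he; subst he
        exact hc (List.any_eq_true.mpr ⟨x, hpt, setEq_refl x⟩)
      refine ⟨x :: ys', ?_, by simp [← hlen], ?_⟩
      · rw [PySem.List.remove?_cons_of_ne t hne, hrem]; rfl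
      · have hcy : ¬ (ys'.any fun q => setEq x q) = true := by
          intro hany
          obtain ⟨a, ha, hax⟩ := List.any_eq_true.mp hany
          exact hc (List.any_eq_true.mpr ⟨a, remove?_subset t ys' p hrem a ha, hax⟩)
        rw [keepLastG_cons_neg [] x ys' (cond_false_of_not_any x ys' hcy),
            keepLastG_cons_neg [] x t (cond_false_of_not_any x t hc), hkeep]

theorem loopA_eq : ∀ f xs, xs.length ≤ f → loopA f xs = keepLastG [] xs := by
  intro f
  induction f with
  | zero =>
    intro xs h
    have : xs = [] := List.eq_nil_of_length_eq_zero (Nat.le_zero.mp h)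
    subst this; rfl
  | succ f ih =>
    intro xs h
    cases hf : findFirst xs with
    | none => simp [loopA, hf, findFirst_none_keep xs hf]
    | some p =>
      obtain ⟨ys, hrem, hlen, hkeep⟩ := step xs p hf
      have : loopA (f + 1) xs = loopA f ys := by simp [loopA, hf, hrem]
      rw [this, ih ys (by omega), hkeep]

-- ===== VERDICT (by name: the statement is the Claim_ definition above) =====
theorem candidates_without_rotations_spec : Claim_equal_candidates_without_rotations := by
  intro sc _
  unfold Spec_candidates_without_rotations candidates_without_rotations candidates_without_rotations_alt
  apply List.map_congr_left
  intro e _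
  have := loopA_eq e.2.length e.2 le_rfl
  rw [this, goB_rev e.2 []]
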